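-- pv_equiv track=rewrite | github.com/andgorbachov/python_homework | Lesson6/lesson6.py | get_students_without
-- ===== SOURCE A (Python) =====
-- def get_students_without(students_courses, unattended_courses):
--     student_list = []
--     for st, cs in students_courses.items():
--         no_course = True
--         for c in unattended_courses:
--             if cs.__contains__(c):
--                 no_course = False
--                 break
--             else:
--                 no_course = True
--         if no_course:
--             student_list.append(st)
--     return student_list
-- ===== SOURCE B (Python) =====
-- def _course_pairs(items):
--     return [(c, st) for st, cs in items for c in cs]
--
-- def _course_index(pairs):
--     index = {}
--     for c, st in pairs:
--         index.setdefault(c, []).append(st)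
--     return index
--
-- def _excluded(index, unattended_courses):
--     s = set()
--     for c in unattended_courses:
--         s.update(index.get(c, []))
--     return s
--
-- def get_students_without(students_courses, unattended_courses):
--     # inverted index course -> students, then union the unattended courses' entries
--     index = _course_index(_course_pairs(students_courses.items()))
--     excluded = _excluded(index, unattended_courses)
--     return [st for st in students_courses if st not in excluded]
-- ===== Notes on version B (the rewrite author's own statement) =====
-- stated objective: faster
-- what changed: Replaces the per-student scan over unattended_courses (list membership test per course) by an inverted index course->students built once, a hash set of excluded students formed by looking up each unattended course, and a final filter of the dict keys.
import Mathlib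
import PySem

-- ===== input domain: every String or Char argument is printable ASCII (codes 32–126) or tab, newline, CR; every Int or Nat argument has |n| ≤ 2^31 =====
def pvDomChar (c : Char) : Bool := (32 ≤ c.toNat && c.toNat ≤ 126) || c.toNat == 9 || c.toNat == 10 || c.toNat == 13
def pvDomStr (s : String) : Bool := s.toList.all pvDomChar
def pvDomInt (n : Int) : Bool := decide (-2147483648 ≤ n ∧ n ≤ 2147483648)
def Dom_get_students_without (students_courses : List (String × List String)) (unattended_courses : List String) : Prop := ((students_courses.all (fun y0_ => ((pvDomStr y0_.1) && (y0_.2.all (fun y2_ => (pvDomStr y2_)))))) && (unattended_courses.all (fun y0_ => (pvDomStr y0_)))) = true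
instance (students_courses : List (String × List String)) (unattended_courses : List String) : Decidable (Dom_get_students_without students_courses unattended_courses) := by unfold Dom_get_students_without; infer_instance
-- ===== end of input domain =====

-- B replaces A's per-student scan over unattended_courses by an inverted index
-- course -> students, a set of excluded students, and a filter of the dict keys
-- (alternative decomposition; same return value).

-- ===== PORT A =====
-- inner 'for c in unattended_courses' loop with its break: returns the final no_course flag
def noCourse (cs : List String) : List String → Bool
  | [] => true
  | c :: rest => if cs.contains c then false else noCourse cs rest

def get_students_without (students_courses : List (String × List String)) (unattended_courses : List String) : List String :=
  (PySem.Dict.ofList students_courses).items.foldl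
    (fun student_list p => if noCourse p.2 unattended_courses then student_list ++ [p.1] else student_list) []

-- ===== PORT B =====
-- _course_pairs
def coursePairs (items : List (String × List String)) : List (String × String) :=
  items.flatMap (fun p => p.2.map (fun c => (c, p.1)))

-- _course_index: course -> list of students taking it
def courseIndex (pairs : List (String × String)) : PySem.Dict String (List String) :=
  pairs.foldl (fun idx q => idx.modify q.1 ([] : List String) (fun l => l ++ [q.2])) PySem.Dict.empty

-- _excluded: union of the index entries of the unattended courses
def excludedSet (index : PySem.Dict String (List String)) (unattended_courses : List String) : PySem.Set String :=
  unattended_courses.foldl (fun s c => PySem.Set.update s (index.getD c [])) PySem.Set.empty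

def get_students_without_alt (students_courses : List (String × List String)) (unattended_courses : List String) : List String :=
  (PySem.Dict.ofList students_courses).keys.filter
    (fun st => !(PySem.Set.contains (excludedSet (courseIndex (coursePairs (PySem.Dict.ofList students_courses).items)) unattended_courses) st))

-- ===== PRECONDITION & SPEC =====
def Spec_get_students_without (students_courses : List (String × List String)) (unattended_courses : List String) (out : List String) : Prop := out = get_students_without_alt students_courses unattended_courses
instance (students_courses : List (String × List String)) (unattended_courses : List String) (out : List String) : Decidable (Spec_get_students_without students_courses unattended_courses out) := by unfold Spec_get_students_without; infer_instance

-- ===== CLAIM (what is proved, stated in full; the proofs are below) =====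
def Claim_equal_get_students_without : Prop := ∀ (students_courses : List (String × List String)) (unattended_courses : List String), Dom_get_students_without students_courses unattended_courses → Spec_get_students_without students_courses unattended_courses (get_students_without students_courses unattended_courses)

-- ===== LEMMAS AND PROOFS =====

-- A's inner loop is a negated 'any' over unattended_courses
theorem noCourse_eq (cs : List String) (uc : List String) :
    noCourse cs uc = !(uc.any (fun c => cs.contains c)) := by
  induction uc with
  | nil => rfl
  | cons c rest ih => simp [noCourse, ih, List.contains_eq_mem]

-- A's outer loop is filter + map
theorem foldlA (uc : List String) (items : List (String × List String)) (acc : List String) :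
    items.foldl (fun sl p => if noCourse p.2 uc then sl ++ [p.1] else sl) acc
      = acc ++ (items.filter (fun p => noCourse p.2 uc)).map (fun p => p.1) := by
  induction items generalizing acc with
  | nil => simp
  | cons p rest ih => by_cases h : noCourse p.2 uc <;> simp [h, ih]

-- membership in B's excluded-set fold
theorem mem_foldl_update {α β : Type} [BEq α] [LawfulBEq α] (f : β → List α)
    (l : List β) (s : PySem.Set α) (y : α) :
    y ∈ l.foldl (fun s c => PySem.Set.update s (f c)) s ↔ y ∈ s ∨ ∃ c ∈ l, y ∈ f c := by
  induction l generalizing s with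
  | nil => simp
  | cons c rest ih =>
    simp only [List.foldl_cons, ih, PySem.Set.mem_update, List.mem_cons]
    constructor
    · rintro (⟨h | h⟩ | ⟨c', hc', h⟩)
      · exact Or.inl h
      · exact Or.inr ⟨c, Or.inl rfl, h⟩
      · exact Or.inr ⟨c', Or.inr hc', h⟩
    · rintro (h | ⟨c', (rfl | hc'), h⟩)
      · exact Or.inl (Or.inl h)
      · exact Or.inl (Or.inr h)
      · exact Or.inr ⟨c', hc', h⟩

theorem getD_courseIndex (pairs : List (String × String)) (c : String) :
    (courseIndex pairs).getD c [] = (pairs.filter (fun q => q.1 == c)).map (fun q => q.2) := by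
  unfold courseIndex
  rw [PySem.Dict.getD_foldl_modify_append]
  simp

theorem mem_excludedSet (items : List (String × List String)) (uc : List String) (y : String) :
    y ∈ excludedSet (courseIndex (coursePairs items)) uc ↔
      ∃ c ∈ uc, ∃ r ∈ items, r.1 = y ∧ c ∈ r.2 := by
  unfold excludedSet
  rw [mem_foldl_update]
  simp only [PySem.Set.empty, List.not_mem_nil, false_or]
  refine exists_congr fun c => and_congr_right fun _ => ?_
  simp only [getD_courseIndex, List.mem_map, List.mem_filter, coursePairs, List.mem_flatMap,
    List.mem_map, beq_iff_eq]
  constructor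
  · rintro ⟨q, ⟨⟨r, hr, c', hc', rfl⟩, h1⟩, h2⟩
    exact ⟨r, hr, h2, by rw [← h1]; exact hc'⟩
  · rintro ⟨r, hr, rfl, hcr⟩
    exact ⟨(c, r.1), ⟨⟨r, hr, c, hcr, rfl⟩, rfl⟩, rfl⟩

-- ===== VERDICT (by name: the statement is the Claim_ definition above) =====
theorem get_students_without_spec : Claim_equal_get_students_without := by
  intro sc uc _
  unfold Spec_get_students_without get_students_without get_students_without_alt
  have hnd : (PySem.Dict.ofList sc).keys.Nodup := PySem.Dict.nodup_keys_ofList sc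
  rw [foldlA, List.nil_append]
  have hkeys : (PySem.Dict.ofList sc).keys = (PySem.Dict.ofList sc).items.map (fun p => p.1) := rfl
  rw [hkeys, List.filter_map]
  apply congrArg (List.map _)
  apply List.filter_congr
  intro p hp
  have h2 : PySem.Set.contains
      (excludedSet (courseIndex (coursePairs (PySem.Dict.ofList sc).items)) uc) p.1
      = uc.any (fun c => p.2.contains c) := by
    rw [Bool.eq_iff_iff, PySem.Set.contains_iff, mem_excludedSet]
    simp only [List.any_eq_true, List.contains_eq_mem, decide_eq_true_eq]
    constructor
    · rintro ⟨c, hc, r, hr, hr1, hcr⟩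
      have ha : (PySem.Dict.ofList sc).get? r.1 = some r.2 :=
        PySem.Dict.get?_of_mem_items _ (by simpa using hr) hnd
      have hb : (PySem.Dict.ofList sc).get? p.1 = some p.2 :=
        PySem.Dict.get?_of_mem_items _ (by simpa using hp) hnd
      rw [hr1, hb] at ha
      have : p.2 = r.2 := by injection ha
      exact ⟨c, hc, this ▸ hcr⟩
    · rintro ⟨c, hc, hcp⟩
      exact ⟨c, hc, p, hp, rfl, hcp⟩
  simp only [noCourse_eq, Function.comp_apply, h2]
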